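-- pv_equiv track=rewrite | github.com/dawin002/Algorithm | This_is_Codingtest/P6_F_greedy_무지의_라이브_먹방.py | mooji_live_ans
-- ===== SOURCE A (Python) =====
-- def mooji_live_ans(food_times, k):
--     import heapq
--
--     # 음식을 다 먹는 시간보다 <= k 라면 -1
--     if sum(food_times) <= k:
--         return -1
--
--     # 시간이 작은 음식부터 빼야되니까 우선순위큐 사용
--     q = []
--     for i in range(len(food_times)):
--         # (음식 시간, 음식 번호) 형태로 큐에 삽입
--         heapq.heappush(q, (food_times[i], i+1))
--
--     sum_value = 0   # 먹기 위해 사용한 시간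
--     previous = 0    # 직전에 다 먹은 음식 시간
--     length = len(food_times)   # 남은 음식 개수
--
--     # sum_value + (현재 음식 시간 - 직전 음식 시간) * 현재 음식 개수   와  k  비교
--     while sum_value + ((q[0][0] - previous) * length) <= k:
--         now = heapq.heappop(q)[0]
--         sum_value += (now - previous) * length
--         length -= 1     # 다 먹은 음식 제외
--         previous = now  # 이전 음식 시간 재설정
--
--     # 남은 음식 중에서 몇 번째 음식인지 확인해 출력
--     result = sorted(q, key=lambda x: x[1])
--     return result[(k - sum_value) % length][1]
-- ===== SOURCE B (Python) =====
-- def mooji_live_ans(food_times, k):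
--     if sum(food_times) <= k:
--         return -1
--
--     # spend(r) = total seconds consumed once every food has been eaten
--     # min(t, r) times, i.e. after r full rounds of the rotation
--     def spend(r):
--         return sum(t if t < r else r for t in food_times)
--
--     # binary search the last full-round count r with spend(r) <= k
--     lo = -abs(k) - 1        # spend(lo) <= lo <= k
--     hi = max(food_times)    # spend(hi) = sum(food_times) > k
--     while lo + 1 < hi:
--         mid = (lo + hi) // 2
--         if spend(mid) <= k:
--             lo = mid
--         else:
--             hi = mid
--
--     survivors = [i + 1 for i, t in enumerate(food_times) if t > lo]
--     return survivors[(k - spend(lo)) % len(survivors)]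
-- ===== Notes on version B (the rewrite author's own statement) =====
-- stated objective: alternative
-- what changed: Replaces A's event simulation (a heap of (time,index) pairs popped one food at a time while accumulating sum_value/previous/length, then sorting the surviving heap) by a parametric binary search: B never sorts or orders the foods at all, it binary-searches the largest full-rotation count r with sum(min(t, r)) <= k, takes the survivors as the foods with t > r in original index order by one linear filter, and indexes them with (k - spend(r)) mod len.
import Mathlib
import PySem

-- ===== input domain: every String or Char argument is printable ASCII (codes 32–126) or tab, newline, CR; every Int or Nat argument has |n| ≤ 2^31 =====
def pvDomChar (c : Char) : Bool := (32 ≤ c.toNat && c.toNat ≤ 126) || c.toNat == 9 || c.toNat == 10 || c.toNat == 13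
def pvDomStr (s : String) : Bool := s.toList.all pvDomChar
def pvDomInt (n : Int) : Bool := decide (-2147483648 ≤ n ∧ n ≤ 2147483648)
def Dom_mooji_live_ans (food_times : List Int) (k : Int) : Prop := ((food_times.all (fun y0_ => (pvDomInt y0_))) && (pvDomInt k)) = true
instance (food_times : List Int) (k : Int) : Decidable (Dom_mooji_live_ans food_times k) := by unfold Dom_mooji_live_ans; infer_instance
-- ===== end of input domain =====

-- B replaces A's heap simulation by a binary search on the full-rotation count (objective: alternative).
-- ===== PORT A =====
-- heapq is a stdlib module (its internals are not part of A's source); it is ported by its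
-- min-priority-queue contract: the queue is kept ascending in Python tuple (lexicographic)
-- order, heappush is an ordered insert, q[0] is the head, heappop removes the head —
-- observationally exact for A's usage (all queue elements are distinct (time, index) pairs).
def pvLexBefore (a b : Int × Int) : Bool :=
  decide (a.1 < b.1) || (!decide (b.1 < a.1) && decide (a.2 < b.2))

def pvHeappush (q : List (Int × Int)) (x : Int × Int) : List (Int × Int) :=
  PySem.List.insertBy pvLexBefore x q

-- A's while loop; on q = [] Python would evaluate q[0] and raise IndexError (excluded by Pre_)
def pvALoop (q : List (Int × Int)) (sum_value previous length k : Int) :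
    List (Int × Int) × Int × Int :=
  match q with
  | [] => ([], sum_value, length)
  | (t, i) :: rest =>
    if sum_value + (t - previous) * length ≤ k then
      pvALoop rest (sum_value + (t - previous) * length) t (length - 1) k
    else ((t, i) :: rest, sum_value, length)

def mooji_live_ans (food_times : List Int) (k : Int) : Int :=
  if food_times.sum ≤ k then -1
  else
    let q := (PySem.List.pyRange 0 (food_times.length : Int) 1).foldl
      (fun q i => pvHeappush q (PySem.List.pyGetD food_times i 0, i + 1)) []
    let r := pvALoop q 0 0 (food_times.length : Int) k
    let result := PySem.List.sorted r.1 (fun x => x.2) false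
    (PySem.List.pyGetD result (PySem.Int.mod (k - r.2.1) r.2.2) (0, 0)).2

-- ===== PORT B =====
-- Source B's helper spend(r) = sum(t if t < r else r for t in food_times)
def pvSpend (food_times : List Int) (r : Int) : Int :=
  food_times.foldl (fun s t => s + (if t < r then t else r)) 0

-- Source B's while loop: binary search the last r with spend(r) <= k; the Nat fuel
-- (hi - lo).toNat is an exact bound on the iteration count (the gap shrinks every step),
-- so the fuel recursion computes exactly what the Python while loop computes
def pvBSearchF (food_times : List Int) (k : Int) : Nat → Int → Int → Int
  | 0, lo, _ => lo
  | fuel + 1, lo, hi =>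
    if lo + 1 < hi then
      let mid := PySem.Int.floordiv (lo + hi) 2
      if pvSpend food_times mid ≤ k then pvBSearchF food_times k fuel mid hi
      else pvBSearchF food_times k fuel lo mid
    else lo

def pvBSearch (food_times : List Int) (k lo hi : Int) : Int :=
  pvBSearchF food_times k (hi - lo).toNat lo hi

-- max(food_times) raises ValueError on []; that input is outside Pre_ (the .getD 0 is never read there)
def mooji_live_ans_alt (food_times : List Int) (k : Int) : Int :=
  if food_times.sum ≤ k then -1
  else
    let lo := -|k| - 1
    let hi := (PySem.List.max? food_times (fun t => t)).getD 0
    let r := pvBSearch food_times k lo hi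
    let survivors := ((PySem.List.enumerate food_times 0).filter
      (fun p => decide (r < p.2))).map (fun p => p.1 + 1)
    PySem.List.pyGetD survivors
      (PySem.Int.mod (k - pvSpend food_times r) (survivors.length : Int)) 0

-- ===== PRECONDITION & SPEC =====
-- Pre_ excludes only the empty list with k < 0, where A raises IndexError (q[0] on an
-- empty heap) and B raises ValueError (max of an empty list); on every other input A returns normally.
def Pre_mooji_live_ans (food_times : List Int) (k : Int) : Prop := food_times = [] → 0 ≤ k
instance (food_times : List Int) (k : Int) : Decidable (Pre_mooji_live_ans food_times k) := by
  unfold Pre_mooji_live_ans; infer_instance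

def pvWitness_mooji_live_ans : List Int × Int := ([3, 1, 2], 5)

def Spec_mooji_live_ans (food_times : List Int) (k : Int) (out : Int) : Prop :=
  out = mooji_live_ans_alt food_times k
instance (food_times : List Int) (k : Int) (out : Int) :
    Decidable (Spec_mooji_live_ans food_times k out) := by
  unfold Spec_mooji_live_ans; infer_instance

-- ===== CLAIM (what is proved, stated in full; the proofs are below) =====
def Claim_equal_mooji_live_ans : Prop := ∀ (food_times : List Int) (k : Int),
  Dom_mooji_live_ans food_times k → Pre_mooji_live_ans food_times k →
  Spec_mooji_live_ans food_times k (mooji_live_ans food_times k)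

-- ===== LEMMAS AND PROOFS =====

-- the closed-form cost list: cost of the j-th heap pop (used only to state A's loop result)
def pvBCosts : List (Int × Int) → Int → Int → Int → List Int
  | [], _, _, _ => []
  | (t, _) :: rest, p, j, n => (p + t + t * (n - j)) :: pvBCosts rest (p + t) (j + 1) n

-- pvLexBefore is the strict lexicographic order on pairs
theorem pvLexBefore_eq :
    pvLexBefore = fun a b : Int × Int => decide (toLex a < toLex b) := by
  funext a b
  simp only [pvLexBefore, Prod.Lex.lt_iff]
  by_cases h1 : a.1 < b.1 <;> by_cases h2 : b.1 < a.1 <;> by_cases h3 : a.2 < b.2 <;>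
    simp [h1, h2, h3] <;> omega

-- A's heap build is the lexicographically sorted tagged list
theorem pvBuild_eq (ft : List Int) :
    (PySem.List.pyRange 0 (ft.length : Int) 1).foldl
      (fun q i => pvHeappush q (PySem.List.pyGetD ft i 0, i + 1)) [] =
    PySem.List.sorted2 ((PySem.List.enumerate ft 0).map (fun p => (p.2, p.1 + 1)))
      (fun x => x.1) (fun x => x.2) false := by
  rw [show PySem.List.sorted2 ((PySem.List.enumerate ft 0).map (fun p => (p.2, p.1 + 1)))
        (fun x => x.1) (fun x => x.2) false =
      List.foldl (fun acc x => PySem.List.insertBy pvLexBefore x acc) []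
        ((PySem.List.enumerate ft 0).map (fun p => (p.2, p.1 + 1))) from rfl,
    PySem.List.enumerate_eq_map_pyRange ft 0, List.map_map, List.foldl_map]
  rfl

theorem pvSorted2_eq_sorted_toLex (L : List (Int × Int)) :
    PySem.List.sorted2 L (fun x => x.1) (fun x => x.2) false =
    PySem.List.sorted L (fun x => toLex x) false := by
  rw [PySem.List.sorted_eq_foldl_insertBy, ← pvLexBefore_eq]
  rfl

theorem pvSorted2_fst_pairwise (L : List (Int × Int)) :
    (PySem.List.sorted2 L (fun x => x.1) (fun x => x.2) false).Pairwise
      (fun a b => a.1 ≤ b.1) := by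
  rw [pvSorted2_eq_sorted_toLex]
  have h := PySem.List.sorted_pairwise L (fun x => toLex x)
  refine h.imp ?_
  intro a b hab
  rcases Prod.Lex.le_iff.mp hab with h' | ⟨h', _⟩
  · exact le_of_lt h'
  · exact le_of_eq h'

-- every cost in the chain is at least p + t0 * (n - j + 1) when t0 bounds all times
theorem pvBCosts_lb (q : List (Int × Int)) (t0 p j n : Int)
    (hb : ∀ s ∈ q, t0 ≤ s.1) (hl : (q.length : Int) = n - j + 1) :
    ∀ x ∈ pvBCosts q p j n, p + t0 * (n - j + 1) ≤ x := by
  induction q generalizing p j with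
  | nil => intro x hx; simp [pvBCosts] at hx
  | cons hd rest ih =>
    obtain ⟨t, i⟩ := hd
    intro x hx
    have ht0 : t0 ≤ t := hb (t, i) (List.mem_cons_self ..)
    have hlen : (rest.length : Int) = n - (j + 1) + 1 := by
      simp at hl; omega
    have hnj : (0 : Int) ≤ n - j := by
      have : (0 : Int) ≤ (rest.length : Int) := Int.natCast_nonneg _
      omega
    simp only [pvBCosts, List.mem_cons] at hx
    rcases hx with rfl | hx
    · nlinarith
    · have := ih (p + t) (j + 1) (fun s hs => hb s (List.mem_cons_of_mem _ hs)) hlen x hx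
      nlinarith

-- A's while loop, on a sorted queue, stops after exactly countP (· ≤ k) of the
-- closed-form costs, with matching sum_value and length
theorem pvALoop_eq (k n : Int) (q : List (Int × Int)) (p j sv prev len : Int)
    (hsort : q.Pairwise (fun a b => a.1 ≤ b.1))
    (hsv : sv = p + prev * len) (hlen : len = n - j + 1)
    (hql : (q.length : Int) = len) :
    pvALoop q sv prev len k =
      (q.drop (List.countP (fun s => decide (s ≤ k)) (pvBCosts q p j n)),
       (if List.countP (fun s => decide (s ≤ k)) (pvBCosts q p j n) = 0 then sv
        else PySem.List.pyGetD (pvBCosts q p j n)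
          ((List.countP (fun s => decide (s ≤ k)) (pvBCosts q p j n) : Int) - 1) 0,
        len - (List.countP (fun s => decide (s ≤ k)) (pvBCosts q p j n) : Int))) := by
  induction q generalizing p j sv prev len with
  | nil => simp [pvALoop, pvBCosts]
  | cons hd rest ih =>
    obtain ⟨t, i⟩ := hd
    have hrl : (rest.length : Int) = len - 1 := by simp at hql; omega
    have hcond : sv + (t - prev) * len = p + t + t * (n - j) := by
      subst hsv; subst hlen; ring
    simp only [pvBCosts, pvALoop]
    by_cases hc : sv + (t - prev) * len ≤ k
    · -- head is eaten
      have hck : (decide (p + t + t * (n - j) ≤ k)) = true := by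
        rw [← hcond]; exact decide_eq_true hc
      rw [if_pos hc]
      have hrec := ih (p + t) (j + 1) (sv + (t - prev) * len) t (len - 1)
        (List.Pairwise.of_cons hsort)
        (by rw [hcond, hlen]; ring) (by omega) hrl
      rw [hrec]
      set m := List.countP (fun s => decide (s ≤ k)) (pvBCosts rest (p + t) (j + 1) n) with hm
      have hcnt : List.countP (fun s => decide (s ≤ k))
          ((p + t + t * (n - j)) :: pvBCosts rest (p + t) (j + 1) n) = m + 1 := by
        simp [hck, hm]
      rw [hcnt]
      simp only [Prod.mk.injEq]
      refine ⟨by simp, ?_, by push_cast; ring⟩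
      -- the spent component
      rw [if_neg (Nat.succ_ne_zero m),
        show ((m + 1 : Nat) : Int) - 1 = ((m : Nat) : Int) by push_cast; ring,
        PySem.List.pyGetD_natCast]
      by_cases hm0 : m = 0
      · rw [if_pos hm0, hm0, List.getD_cons_zero, hcond]
      · obtain ⟨m', hm'⟩ := Nat.exists_eq_succ_of_ne_zero hm0
        rw [if_neg hm0, hm', List.getD_cons_succ,
          show ((m' + 1 : Nat) : Int) - 1 = ((m' : Nat) : Int) by push_cast; ring,
          PySem.List.pyGetD_natCast]
    · -- head not eaten: every cost is at least the head cost, which exceeds k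
      rw [if_neg hc]
      have hhead : ¬ (p + t + t * (n - j) ≤ k) := by rw [← hcond]; exact hc
      have ht0 : ∀ s ∈ (t, i) :: rest, t ≤ s.1 := by
        intro s hs
        rcases List.mem_cons.mp hs with rfl | hs
        · exact le_refl _
        · exact (List.pairwise_cons.mp hsort).1 s hs
      have hlb := pvBCosts_lb ((t, i) :: rest) t p j n ht0 (by omega)
      have hcnt : List.countP (fun s => decide (s ≤ k))
          (pvBCosts ((t, i) :: rest) p j n) = 0 := by
        rw [List.countP_eq_zero]
        intro x hx
        have h1 := hlb x hx
        have h2 : p + t * (n - j + 1) = p + t + t * (n - j) := by ring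
        simp only [decide_eq_true_eq]
        omega
      simp only [pvBCosts] at hcnt
      rw [hcnt]
      simp

-- spend as a sum of pointwise minima
theorem pvSpend_eq_sum (ft : List Int) (r : Int) :
    pvSpend ft r = (ft.map (fun t => min t r)).sum := by
  unfold pvSpend
  have hf : (fun (s t : Int) => s + (if t < r then t else r)) =
      (fun (s t : Int) => s + min t r) := by
    funext s t
    by_cases h : t < r <;> simp [min_def] <;> omega
  rw [hf, PySem.List.foldl_add, zero_add]

-- spend is monotone
theorem pvSpend_mono (ft : List Int) {r r' : Int} (h : r ≤ r') :
    pvSpend ft r ≤ pvSpend ft r' := by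
  rw [pvSpend_eq_sum, pvSpend_eq_sum]
  apply List.sum_le_sum
  intro t _
  exact min_le_min le_rfl h

-- auxiliary form of the binary-search specification, with an explicit fuel bound
theorem pvBSearch_spec_aux (ft : List Int) (k : Int) :
    ∀ N : Nat, ∀ lo hi : Int, (hi - lo).toNat ≤ N →
      lo < hi → pvSpend ft lo ≤ k → k < pvSpend ft hi →
      pvSpend ft (pvBSearchF ft k N lo hi) ≤ k ∧
      k < pvSpend ft (pvBSearchF ft k N lo hi + 1) ∧
      lo ≤ pvBSearchF ft k N lo hi ∧ pvBSearchF ft k N lo hi + 1 ≤ hi := by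
  intro N
  induction N with
  | zero => intro lo hi hN hlt _ _; omega
  | succ N ih =>
    intro lo hi hN hlt h1 h2
    simp only [pvBSearchF]
    by_cases h : lo + 1 < hi
    · rw [if_pos h]
      have hmid := PySem.Int.floordiv_eq_ediv_of_pos (a := lo + hi) (b := 2) (by omega)
      have hb1 : lo < PySem.Int.floordiv (lo + hi) 2 := by rw [hmid]; omega
      have hb2 : PySem.Int.floordiv (lo + hi) 2 < hi := by rw [hmid]; omega
      by_cases hc : pvSpend ft (PySem.Int.floordiv (lo + hi) 2) ≤ k
      · rw [if_pos hc]
        have := ih (PySem.Int.floordiv (lo + hi) 2) hi (by omega) hb2 hc h2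
        exact ⟨this.1, this.2.1, by omega, this.2.2.2⟩
      · rw [if_neg hc]
        have := ih lo (PySem.Int.floordiv (lo + hi) 2) (by omega) hb1 h1 (by omega)
        exact ⟨this.1, this.2.1, this.2.2.1, by omega⟩
    · rw [if_neg h]
      have hhi : hi = lo + 1 := by omega
      exact ⟨h1, by rw [← hhi]; exact h2, le_refl _, by omega⟩

-- the binary search finds the last r with spend(r) <= k
theorem pvBSearch_spec (ft : List Int) (k : Int) :
    ∀ lo hi : Int, lo < hi → pvSpend ft lo ≤ k → k < pvSpend ft hi →
      pvSpend ft (pvBSearch ft k lo hi) ≤ k ∧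
      k < pvSpend ft (pvBSearch ft k lo hi + 1) ∧
      lo ≤ pvBSearch ft k lo hi ∧ pvBSearch ft k lo hi + 1 ≤ hi := by
  intro lo hi hlt h1 h2
  unfold pvBSearch
  exact pvBSearch_spec_aux ft k (hi - lo).toNat lo hi le_rfl hlt h1 h2

-- the cost chain of a sorted queue is the pointwise-min sum over its own times
theorem pvBCosts_eq_map (q : List (Int × Int)) (p j n : Int)
    (hsort : q.Pairwise (fun a b => a.1 ≤ b.1)) (hl : (q.length : Int) = n - j + 1) :
    pvBCosts q p j n = q.map (fun x => p + (q.map (fun y => min y.1 x.1)).sum) := by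
  induction q generalizing p j with
  | nil => simp [pvBCosts]
  | cons hd rest ih =>
    obtain ⟨t, i⟩ := hd
    have hle : ∀ y ∈ rest, t ≤ y.1 := by
      intro y hy; exact (List.pairwise_cons.mp hsort).1 y hy
    have hlr : (rest.length : Int) = n - (j + 1) + 1 := by simp at hl; omega
    simp only [pvBCosts, List.map_cons, List.sum_cons, min_self]
    congr 1
    · -- head cost
      have hmins : rest.map (fun y => min y.1 t) = rest.map (fun _ => t) :=
        List.map_congr_left (fun y hy => min_eq_right (hle y hy))
      rw [hmins, PySem.List.sum_map_const_int, hlr]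
      ring
    · -- tail costs
      rw [ih (p + t) (j + 1) (List.Pairwise.of_cons hsort) hlr]
      apply List.map_congr_left
      intro x hx
      have hmt : min t x.1 = t := min_eq_left (hle x hx)
      simp only [hmt]
      ring

-- split lemma for spend at a point separating a prefix from the rest
theorem pvSplitSum (l : List (Int × Int)) (m : Nat) (x : Int)
    (hm : m ≤ l.length)
    (htake : ∀ y ∈ l.take m, y.1 ≤ x) (hdrop : ∀ y ∈ l.drop m, x < y.1) :
    (l.map (fun y => min y.1 x)).sum =
      ((l.take m).map (fun y => y.1)).sum + x * ((l.length : Int) - m) := by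
  conv_lhs => rw [← List.take_append_drop m l]
  rw [List.map_append, List.sum_append]
  have h1 : (l.take m).map (fun y => min y.1 x) = (l.take m).map (fun y => y.1) := by
    apply List.map_congr_left
    intro y hy; exact min_eq_left (htake y hy)
  have h2 : (l.drop m).map (fun y => min y.1 x) = (l.drop m).map (fun _ => x) := by
    apply List.map_congr_left
    intro y hy
    have := hdrop y hy
    simp [min_def]; omega
  rw [h1, h2, PySem.List.sum_map_const_int]
  have : (l.drop m).length = l.length - m := List.length_drop ..
  rw [this]
  have : ((l.length - m : Nat) : Int) = (l.length : Int) - m := by omega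
  rw [this]; ring

-- the elements with key ≤ r form a prefix of a key-sorted list
theorem pvPrefixSplit (l : List (Int × Int)) (r : Int)
    (hsort : l.Pairwise (fun a b => a.1 ≤ b.1)) :
    (∀ x ∈ l.take (l.countP (fun x => decide (x.1 ≤ r))), x.1 ≤ r) ∧
    l.drop (l.countP (fun x => decide (x.1 ≤ r))) =
      l.filter (fun x => decide (r < x.1)) := by
  induction l with
  | nil => simp
  | cons hd t ih =>
    have hle : ∀ y ∈ t, hd.1 ≤ y.1 := (List.pairwise_cons.mp hsort).1
    obtain ⟨iht, ihd⟩ := ih (List.Pairwise.of_cons hsort)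
    by_cases hhd : hd.1 ≤ r
    · have hc : List.countP (fun x : Int × Int => decide (x.1 ≤ r)) (hd :: t) =
          List.countP (fun x : Int × Int => decide (x.1 ≤ r)) t + 1 := by
        simp [hhd]
      rw [hc]
      constructor
      · intro x hx
        rw [List.take_succ_cons] at hx
        rcases List.mem_cons.mp hx with rfl | hx
        · exact hhd
        · exact iht x hx
      · rw [List.drop_succ_cons, ihd, List.filter_cons_of_neg (by simpa using hhd)]
    · have hgt : r < hd.1 := by omega
      have h0 : List.countP (fun x : Int × Int => decide (x.1 ≤ r)) t = 0 := by
        rw [List.countP_eq_zero]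
        intro x hx
        have := hle x hx
        simp only [decide_eq_true_eq]
        omega
      have hc : List.countP (fun x : Int × Int => decide (x.1 ≤ r)) (hd :: t) = 0 := by
        simp [hhd, h0]
      rw [hc]
      refine ⟨by simp, ?_⟩
      rw [List.drop_zero, List.filter_eq_self.mpr]
      intro x hx
      rcases List.mem_cons.mp hx with rfl | hx
      · simpa using hgt
      · have := hle x hx
        simp only [decide_eq_true_eq]
        omega

-- Python mod is invariant under shifting by a multiple of a positive divisor
theorem pvModCongr (k a b L : Int) (hL : 0 < L) (h : L ∣ (b - a)) :
    PySem.Int.mod (k - a) L = PySem.Int.mod (k - b) L := by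
  rw [PySem.Int.mod_eq_emod_of_pos hL, PySem.Int.mod_eq_emod_of_pos hL]
  have hd : ((k - a) - (k - b)) % L = 0 := by
    have h2 : (k - a) - (k - b) = b - a := by ring
    rw [h2]
    exact Int.emod_eq_zero_of_dvd h
  exact Int.emod_eq_emod_iff_emod_sub_eq_zero.mpr hd

-- ===== VERDICT (by name: the statement is the Claim_ definition above) =====
theorem mooji_live_ans_spec : Claim_equal_mooji_live_ans := by
  intro ft k _ hpre
  unfold Spec_mooji_live_ans mooji_live_ans mooji_live_ans_alt
  by_cases hs : ft.sum ≤ k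
  · simp [hs]
  · simp only [if_neg hs]
    have hne : ft ≠ [] := by
      intro h
      subst h
      simp only [List.sum_nil] at hs
      exact hs (hpre rfl)
    have hn1 : 0 < ft.length := List.length_pos_iff.mpr hne
    obtain ⟨M, hM⟩ : ∃ M, PySem.List.max? ft (fun t => t) = some M := by
      cases hft : ft with
      | nil => exact absurd hft hne
      | cons x t => exact ⟨_, PySem.List.max?_id_cons x t⟩
    have hMmem : M ∈ ft := PySem.List.max?_mem hM
    have hMmax : ∀ y ∈ ft, y ≤ M := by
      have := PySem.List.max?_isMax hM
      simpa using this
    rw [hM]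
    simp only [Option.getD_some]
    rw [pvBuild_eq ft]
    set S := PySem.List.sorted2 ((PySem.List.enumerate ft 0).map (fun p => (p.2, p.1 + 1)))
      (fun x => x.1) (fun x => x.2) false with hS
    set lo0 : Int := -|k| - 1 with hlo0def
    set r := pvBSearch ft k lo0 M with hrdef
    -- facts about the maximum and the binary search
    have hspendM : pvSpend ft M = ft.sum := by
      rw [pvSpend_eq_sum]
      have hmap : ft.map (fun t => min t M) = ft.map id := by
        apply List.map_congr_left
        intro t ht
        exact min_eq_left (hMmax t ht)
      rw [hmap, List.map_id]
    have hspendlo : pvSpend ft lo0 ≤ k := by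
      rw [pvSpend_eq_sum]
      have hb : ∀ x ∈ ft.map (fun t => min t lo0), x ≤ lo0 := by
        intro x hx
        obtain ⟨t, _, rfl⟩ := List.mem_map.mp hx
        exact min_le_right _ _
      have hsum := List.sum_le_card_nsmul (ft.map (fun t => min t lo0)) lo0 hb
      simp only [List.length_map, nsmul_eq_mul] at hsum
      have hk : lo0 ≤ k := by
        rw [hlo0def]
        have := neg_abs_le k
        omega
      have hlo0neg : lo0 < 0 := by
        rw [hlo0def]
        have := abs_nonneg k
        omega
      have hcast : (1 : Int) ≤ (ft.length : Int) := by exact_mod_cast hn1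
      nlinarith
    have hloM : lo0 < M := by
      by_contra hcon
      have := pvSpend_mono ft (show M ≤ lo0 by omega)
      rw [hspendM] at this
      omega
    obtain ⟨hrle, hrgt, hlor, hrM⟩ :=
      pvBSearch_spec ft k lo0 M hloM hspendlo (by rw [hspendM]; omega)
    rw [← hrdef] at hrle hrgt hlor hrM
    -- structure of the sorted tagged list S
    have hSperm : S.Perm ((PySem.List.enumerate ft 0).map (fun p => (p.2, p.1 + 1))) := by
      rw [hS]
      exact PySem.List.sorted2_perm _ _ _ _
    have hSlenN : S.length = ft.length := by
      rw [hSperm.length_eq, List.length_map, PySem.List.length_enumerate]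
    have hSlen : (S.length : Int) = (ft.length : Int) := by exact_mod_cast hSlenN
    have hsort : S.Pairwise (fun a b => a.1 ≤ b.1) := by
      rw [hS]
      exact pvSorted2_fst_pairwise _
    rw [pvALoop_eq k (ft.length : Int) S 0 1 0 0 (ft.length : Int) hsort (by ring) (by ring) hSlen]
    dsimp only
    -- spend through S, and the cost list
    have hspendS : ∀ x : Int, pvSpend ft x = (S.map (fun y => min y.1 x)).sum := by
      intro x
      rw [pvSpend_eq_sum]
      have h1 : (S.map (fun y => min y.1 x)).sum =
          (((PySem.List.enumerate ft 0).map (fun p => (p.2, p.1 + 1))).map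
            (fun y => min y.1 x)).sum := (hSperm.map _).sum_eq
      rw [h1, List.map_map]
      have h2 : ft.map (fun t => min t x) =
          (PySem.List.enumerate ft 0).map
            ((fun y : Int × Int => min y.1 x) ∘ (fun p : Int × Int => (p.2, p.1 + 1))) := by
        conv_lhs => rw [← PySem.List.map_snd_enumerate ft 0]
        rw [List.map_map]
        rfl
      rw [h2]
    have hcost : pvBCosts S 0 1 (ft.length : Int) = S.map (fun x => pvSpend ft x.1) := by
      rw [pvBCosts_eq_map S 0 1 (ft.length : Int) hsort (by omega)]
      apply List.map_congr_left
      intro x _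
      rw [hspendS x.1]
      ring
    set m := List.countP (fun s => decide (s ≤ k)) (pvBCosts S 0 1 (ft.length : Int)) with hmdef
    have hiff : ∀ x : Int × Int, pvSpend ft x.1 ≤ k ↔ x.1 ≤ r := by
      intro x
      constructor
      · intro hx
        by_contra hcon
        have := pvSpend_mono ft (show r + 1 ≤ x.1 by omega)
        omega
      · intro hx
        exact le_trans (pvSpend_mono ft hx) hrle
    have hm' : m = S.countP (fun x => decide (x.1 ≤ r)) := by
      rw [hmdef, hcost, List.countP_map]
      apply List.countP_congr
      intro x _
      simp only [Function.comp_apply, decide_eq_true_eq]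
      exact hiff x
    obtain ⟨htake, hdropf⟩ := pvPrefixSplit S r hsort
    rw [← hm'] at htake hdropf
    have hmle : m ≤ S.length := by
      rw [hm']
      exact List.countP_le_length
    have hdropmem : ∀ y ∈ S.drop m, r < y.1 := by
      intro y hy
      rw [hdropf] at hy
      have := (List.mem_filter.mp hy).2
      simpa using this
    -- the survivor list in index order
    set E := ((PySem.List.enumerate ft 0).filter (fun p => decide (r < p.2))).map
      (fun p : Int × Int => (p.2, p.1 + 1)) with hEdef
    have hfilmap : ((PySem.List.enumerate ft 0).map (fun p : Int × Int => (p.2, p.1 + 1))).filter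
        (fun x => decide (r < x.1)) = E := by
      rw [List.filter_map]
      rfl
    have hEperm : E.Perm (S.filter (fun x => decide (r < x.1))) := by
      rw [← hfilmap]
      exact (hSperm.filter _).symm
    have hEpair : E.Pairwise (fun a b => a.2 < b.2) := by
      rw [hEdef]
      refine List.Pairwise.map _ ?_ ((PySem.List.pairwise_lt_enumerate ft 0).filter _)
      intro a b hab
      simpa using hab
    have hsortE : PySem.List.sorted (S.filter (fun x => decide (r < x.1)))
        (fun x => x.2) false = E :=
      PySem.List.sorted_eq_of_perm_of_pairwise_lt _ _ _ hEperm hEpair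
    have hsurv : ((PySem.List.enumerate ft 0).filter (fun p => decide (r < p.2))).map
        (fun p => p.1 + 1) = E.map (fun y => y.2) := by
      rw [hEdef, List.map_map]
      rfl
    have hElen : E.length = S.length - m := by
      rw [hEperm.length_eq, ← hdropf, List.length_drop]
    have hEne : E ≠ [] := by
      have hMmem' : M ∈ (PySem.List.enumerate ft 0).map (fun p : Int × Int => p.2) := by
        rw [PySem.List.map_snd_enumerate]
        exact hMmem
      obtain ⟨p0, hp0mem, hp0⟩ := List.mem_map.mp hMmem'
      have hp0f : p0 ∈ (PySem.List.enumerate ft 0).filter (fun p => decide (r < p.2)) :=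
        List.mem_filter.mpr ⟨hp0mem, by simp only [decide_eq_true_eq, hp0]; omega⟩
      exact List.ne_nil_of_mem (by rw [hEdef]; exact List.mem_map_of_mem hp0f)
    have hmlt : m < S.length := by
      have := List.length_pos_iff.mpr hEne
      omega
    have hL : (0 : Int) < (ft.length : Int) - m := by omega
    -- the index computed by A equals the index computed by B
    have hdvd : PySem.Int.mod
        (k - (if m = 0 then (0 : Int)
          else PySem.List.pyGetD (pvBCosts S 0 1 (ft.length : Int)) ((m : Int) - 1) 0))
        ((ft.length : Int) - m) =
        PySem.Int.mod (k - pvSpend ft r) ((ft.length : Int) - m) := by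
      by_cases hm0 : m = 0
      · rw [if_pos hm0]
        apply pvModCongr k 0 (pvSpend ft r) _ hL
        have hall : ∀ y ∈ S.take 0, y.1 ≤ r := by simp
        have hsplit := pvSplitSum S 0 r (by omega) hall
          (by simpa using (hm0 ▸ hdropmem : ∀ y ∈ S.drop 0, r < y.1))
        refine ⟨r, ?_⟩
        rw [hspendS r, hsplit]
        simp only [List.take_zero, List.map_nil, List.sum_nil, hm0]
        rw [hSlen]
        push_cast
        ring
      · rw [if_neg hm0]
        have hm1 : 1 ≤ m := Nat.one_le_iff_ne_zero.mpr hm0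
        have hidx : m - 1 < S.length := by omega
        set tstar := (S[m - 1]'hidx).1 with htstar
        have hspent : PySem.List.pyGetD (pvBCosts S 0 1 (ft.length : Int)) ((m : Int) - 1) 0 =
            pvSpend ft tstar := by
          have hcast : ((m : Int) - 1) = ((m - 1 : Nat) : Int) := by omega
          rw [hcast, PySem.List.pyGetD_natCast, hcost,
            List.getD_eq_getElem _ _ (by rw [List.length_map]; omega), List.getElem_map]
        rw [hspent]
        apply pvModCongr k (pvSpend ft tstar) (pvSpend ft r) _ hL
        have hpw := List.pairwise_iff_getElem.mp hsort
        have hmemts : S[m - 1]'hidx ∈ S.take m := by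
          rw [List.mem_take_iff_getElem]
          exact ⟨m - 1, by omega, rfl⟩
        have htsr : tstar ≤ r := htake _ hmemts
        have htakets : ∀ y ∈ S.take m, y.1 ≤ tstar := by
          intro y hy
          rw [List.mem_take_iff_getElem] at hy
          obtain ⟨i, hi, rfl⟩ := hy
          rcases Nat.lt_or_ge i (m - 1) with hlt | hge
          · exact hpw i (m - 1) (by omega) hidx hlt
          · have hieq : i = m - 1 := by omega
            subst hieq
            exact le_refl _
        have hdropts : ∀ y ∈ S.drop m, tstar < y.1 :=
          fun y hy => lt_of_le_of_lt htsr (hdropmem y hy)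
        have hd1 := pvSplitSum S m tstar (le_of_lt hmlt) htakets hdropts
        have hd2 := pvSplitSum S m r (le_of_lt hmlt) htake hdropmem
        refine ⟨r - tstar, ?_⟩
        rw [hspendS tstar, hspendS r, hd1, hd2, hSlen]
        ring
    clear_value S lo0 r m E
    simp only [← hrdef]
    rw [hdropf, hsortE, hsurv, hdvd]
    have hlenE : ((E.map (fun y : Int × Int => y.2)).length : Int) = (ft.length : Int) - m := by
      rw [List.length_map]
      omega
    rw [hlenE]
    set ia := PySem.Int.mod (k - pvSpend ft r) ((ft.length : Int) - m) with hiadef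
    have hia0 : 0 ≤ ia := PySem.Int.mod_nonneg _ hL
    have hialt : ia < (ft.length : Int) - m := PySem.Int.mod_lt _ hL
    rw [PySem.List.pyGetD_eq_getElem _ _ hia0 (by omega),
      PySem.List.pyGetD_eq_getElem _ _ hia0 (by rw [List.length_map]; omega),
      List.getElem_map]
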